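-- pv_equiv track=rewrite | github.com/pypi-data/pypi-mirror-401 | packages/roxie-api/roxie_api-0.4.5.tar.gz/roxie_api-0.4.5/roxieapi/input/builder.py | convert_flag_dct_to_str
-- ===== SOURCE A (Python) =====
-- def convert_flag_dct_to_str(flags: dict) -> str:
--     """Static method converting a dictionary with flags into a formatted string
--     :param flags: a dictionary with flags
--     :return: a formatted string representation of the dictionary with flags
--     """
--     COLUMN_WIDTH = 15
--     flag_per_line_count = 1
--     flag_str = "  "
--     for key, value in flags.items():
--         temp = "%s=%s" % (key, "T" if value else "F")
--         temp += (COLUMN_WIDTH - len(temp)) * " "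
--         if flag_per_line_count < 6:
--             flag_str += temp
--             flag_per_line_count += 1
--         else:
--             flag_str += temp + "\n  "
--             flag_per_line_count = 1
--
--     flag_str += "\n  /"
--     return flag_str
-- ===== SOURCE B (Python) =====
-- def convert_flag_dct_to_str(flags: dict) -> str:
--     cells = [("%s=%s" % (k, "T" if v else "F")).ljust(15) for k, v in flags.items()]
--     chunks = [cells[i:i + 6] for i in range(0, len(cells), 6)]
--     body = "".join("".join(c) + ("\n  " if len(c) == 6 else "") for c in chunks)
--     return "  " + body + "\n  /"
-- ===== Notes on version B (the rewrite author's own statement) =====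
-- stated objective: alternative
-- what changed: Replaced the counter-driven accumulator loop (line-position state threaded through each iteration) with a stateless cells-then-chunks-then-join decomposition: format all cells, split into chunks of 6, join each chunk appending the line break only to full chunks.
import Mathlib
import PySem

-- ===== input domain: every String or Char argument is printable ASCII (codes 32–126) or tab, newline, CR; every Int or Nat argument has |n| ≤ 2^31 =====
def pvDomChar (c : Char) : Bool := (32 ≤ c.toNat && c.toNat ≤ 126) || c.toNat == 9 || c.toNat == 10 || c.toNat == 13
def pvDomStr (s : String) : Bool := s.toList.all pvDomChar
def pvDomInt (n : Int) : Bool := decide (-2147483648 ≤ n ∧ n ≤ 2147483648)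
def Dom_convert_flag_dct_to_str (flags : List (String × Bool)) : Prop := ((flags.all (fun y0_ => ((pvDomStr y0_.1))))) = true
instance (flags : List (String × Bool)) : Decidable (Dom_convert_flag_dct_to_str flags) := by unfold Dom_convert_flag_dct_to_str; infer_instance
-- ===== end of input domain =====

-- B replaces A's counter-driven accumulator loop with a cells → chunks-of-6 → join decomposition (same output, same cost).


-- ===== PORT A =====
-- A's loop: counter starts at 1, "  " seed; each flag formatted to "key=T/F" padded to width 15;
-- after the 6th cell of a line append "\n  " and reset the counter; finally append "\n  /".
def convert_flag_dct_to_str (flags : List (String × Bool)) : String :=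
  let st := flags.foldl (fun (st : Int × List Char) kv =>
      let temp := kv.1.toList ++ ('=' :: [if kv.2 then 'T' else 'F'])
      let temp := temp ++ List.replicate (15 - temp.length) ' '
      if st.1 < 6 then (st.1 + 1, st.2 ++ temp)
      else (1, st.2 ++ temp ++ ['\n', ' ', ' '])) (1, [' ', ' '])
  String.ofList (st.2 ++ ['\n', ' ', ' ', '/'])

-- ===== PORT B =====
-- cell: "%s=%s" % (key, T/F), ljust(15)
def pvCell (kv : String × Bool) : List Char :=
  let t := kv.1.toList ++ ('=' :: [if kv.2 then 'T' else 'F'])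
  t ++ List.replicate (15 - t.length) ' '

-- cells[i:i+6] for i in range(0, len, 6): consecutive chunks of 6
def pvChunks6 {α : Type} (l : List α) : List (List α) :=
  if l = [] then [] else l.take 6 :: pvChunks6 (l.drop 6)
  termination_by l.length
  decreasing_by
    have h0 : 0 < l.length := List.length_pos_iff.mpr (by assumption)
    simp [List.length_drop]; omega

def convert_flag_dct_to_str_alt (flags : List (String × Bool)) : String :=
  let cells := flags.map pvCell
  let body := ((pvChunks6 cells).map
      (fun c => c.flatten ++ if c.length = 6 then ['\n', ' ', ' '] else [])).flatten
  String.ofList ([' ', ' '] ++ body ++ ['\n', ' ', ' ', '/'])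

-- ===== PRECONDITION & SPEC =====
def Spec_convert_flag_dct_to_str (flags : List (String × Bool)) (out : String) : Prop := out = convert_flag_dct_to_str_alt flags
instance (flags : List (String × Bool)) (out : String) : Decidable (Spec_convert_flag_dct_to_str flags out) := by unfold Spec_convert_flag_dct_to_str; infer_instance

-- ===== CLAIM (what is proved, stated in full; the proofs are below) =====
def Claim_equal_convert_flag_dct_to_str : Prop := ∀ (flags : List (String × Bool)), Dom_convert_flag_dct_to_str flags → Spec_convert_flag_dct_to_str flags (convert_flag_dct_to_str flags)

-- ===== LEMMAS AND PROOFS =====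
-- A's loop body, named for the proofs
def pvStepA (st : Int × List Char) (kv : String × Bool) : Int × List Char :=
  let temp := kv.1.toList ++ ('=' :: [if kv.2 then 'T' else 'F'])
  let temp := temp ++ List.replicate (15 - temp.length) ' '
  if st.1 < 6 then (st.1 + 1, st.2 ++ temp)
  else (1, st.2 ++ temp ++ ['\n', ' ', ' '])

-- B's per-chunk body
def pvBody (cells : List (List Char)) : List Char :=
  ((pvChunks6 cells).map
      (fun c => c.flatten ++ if c.length = 6 then ['\n', ' ', ' '] else [])).flatten

-- one ≤6-element stretch of A's loop, from counter c
theorem pvStepA_run (l : List (String × Bool)) (c : Int) (acc : List Char)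
    (h1 : 1 ≤ c) (h2 : c ≤ 6) (h3 : c + l.length ≤ 7) :
    l.foldl pvStepA (c, acc) =
      (if c + l.length = 7 then 1 else c + l.length,
       acc ++ (l.map pvCell).flatten ++ if c + l.length = 7 then ['\n', ' ', ' '] else []) := by
  induction l generalizing c acc with
  | nil =>
    simp
    omega
  | cons x t ih =>
    simp only [List.foldl_cons, List.length_cons] at *
    by_cases hc : c < 6
    · have hstep : pvStepA (c, acc) x = (c + 1, acc ++ pvCell x) := by
        simp [pvStepA, pvCell, hc]
      rw [hstep, ih (c + 1) (acc ++ pvCell x) (by omega) (by omega) (by omega)]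
      have he : c + 1 + (t.length : Int) = c + ((t.length : Int) + 1) := by ring
      simp [he, List.append_assoc]
    · have hc6 : c = 6 := by omega
      have ht : t = [] := by
        have : (t.length : Int) = 0 := by omega
        simpa using this
      subst hc6; subst ht
      have hstep : pvStepA (6, acc) x = (1, acc ++ pvCell x ++ ['\n', ' ', ' ']) := by
        simp [pvStepA, pvCell]
      rw [hstep]
      simp [List.append_assoc]

theorem pvChunks6_nil {α : Type} : pvChunks6 ([] : List α) = [] := by
  rw [pvChunks6]; simp

theorem pvChunks6_cons {α : Type} (l : List α) (h : l ≠ []) :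
    pvChunks6 l = l.take 6 :: pvChunks6 (l.drop 6) := by
  rw [pvChunks6]; simp [h]

-- A's full loop from counter 1 produces B's chunked body
theorem pvFoldA_eq_body (l : List (String × Bool)) (acc : List Char) :
    (l.foldl pvStepA (1, acc)).2 = acc ++ pvBody (l.map pvCell) := by
  by_cases hnil : l = []
  · subst hnil; simp [pvBody, pvChunks6_nil]
  by_cases hlen : l.length ≤ 6
  · have h3 : (1 : Int) + l.length ≤ 7 := by omega
    rw [pvStepA_run l 1 acc (by omega) (by omega) h3]
    have hcells : l.map pvCell ≠ [] := by simpa using hnil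
    have hdrop : (l.map pvCell).drop 6 = [] := by
      simp [List.drop_eq_nil_iff, hlen]
    have htake : (l.map pvCell).take 6 = l.map pvCell := by
      simp [List.take_of_length_le, hlen]
    rw [pvBody, pvChunks6_cons _ hcells, hdrop, pvChunks6_nil, htake]
    have hlc : (l.map pvCell).length = l.length := by simp
    by_cases h6 : l.length = 6
    · have : (1 : Int) + l.length = 7 := by omega
      simp [this, hlc, h6, List.append_assoc]
    · simp [hlc, h6]
      omega
  · rw [not_le] at hlen
    have hsplit : l = l.take 6 ++ l.drop 6 := (List.take_append_drop 6 l).symm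
    have hlt6 : (l.take 6).length = 6 := by simp [List.length_take]; omega
    conv_lhs => rw [hsplit]
    rw [List.foldl_append]
    rw [pvStepA_run (l.take 6) 1 acc (by omega) (by omega) (by rw [hlt6]; norm_num)]
    have h7 : (1 : Int) + ((l.take 6).length : Int) = 7 := by rw [hlt6]; norm_num
    rw [if_pos h7, if_pos h7]
    rw [pvFoldA_eq_body (l.drop 6)]
    have hcells : l.map pvCell ≠ [] := by simpa using hnil
    simp only [pvBody]
    rw [pvChunks6_cons _ hcells]
    have ht : (l.map pvCell).take 6 = (l.take 6).map pvCell := by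
      simp [List.map_take]
    have hd : (l.map pvCell).drop 6 = (l.drop 6).map pvCell := by
      simp [List.map_drop]
    have hl6 : ((l.map pvCell).take 6).length = 6 := by
      rw [ht, List.length_map, hlt6]
    rw [List.map_cons, List.flatten_cons, hl6]
    simp only [ht, hd, if_pos, List.append_assoc]
  termination_by l.length
  decreasing_by simp [List.length_drop]; omega

-- ===== VERDICT (by name: the statement is the Claim_ definition above) =====
theorem convert_flag_dct_to_str_spec : Claim_equal_convert_flag_dct_to_str := by
  intro flags _
  unfold Spec_convert_flag_dct_to_str convert_flag_dct_to_str convert_flag_dct_to_str_alt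
  have h := pvFoldA_eq_body flags [' ', ' ']
  simp only [show (fun (st : Int × List Char) (kv : String × Bool) =>
      let temp := kv.1.toList ++ ('=' :: [if kv.2 then 'T' else 'F'])
      let temp := temp ++ List.replicate (15 - temp.length) ' '
      if st.1 < 6 then (st.1 + 1, st.2 ++ temp)
      else (1, st.2 ++ temp ++ ['\n', ' ', ' '])) = pvStepA from rfl]
  rw [h]
  simp [pvBody]
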